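-- pv_equiv track=rewrite | github.com/dim-ghub/cyberia-decky | backend/slsonline.py | _update_status_section
-- ===== SOURCE A (Python) =====
-- def _update_status_section(content: str, section_name: str, updates: dict) -> str:
--     lines = content.split('\n')
--     result = []
--     i = 0
--
--     while i < len(lines):
--         line = lines[i]
--
--         if line.strip().startswith(f'{section_name}:'):
--             result.append(line)
--             i += 1
--
--             section_indent = len(line) - len(line.lstrip())
--             found_appid = False
--             found_title = False
--
--             while i < len(lines):
--                 current = lines[i]
--                 indent = len(current) - len(current.lstrip())
--
--                 if current.strip() == '':
--                     result.append(current)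
--                     i += 1
--                     continue
--
--                 if indent <= section_indent:
--                     break
--
--                 if 'AppId:' in current:
--                     found_appid = True
--                     if 'AppId' in updates:
--                         appid_value = updates['AppId']
--                         result.append(' ' * (section_indent + 2) + f"AppId: {appid_value}")
--                     i += 1
--                 elif 'Title:' in current:
--                     found_title = True
--                     if 'Title' in updates:
--                         title_value = updates['Title']
--                         if '"' not in str(title_value) and "'" not in str(title_value):
--                             title_value = f'"{title_value}"'
--                         result.append(' ' * (section_indent + 2) + f"Title: {title_value}")
--                     i += 1
--                 else:
--                     result.append(current)
--                     i += 1
--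
--             if not found_appid and 'AppId' in updates:
--                 result.append(' ' * (section_indent + 2) + f"AppId: {updates['AppId']}")
--             if not found_title and 'Title' in updates:
--                 title_value = updates['Title']
--                 if '"' not in str(title_value) and "'" not in str(title_value):
--                     title_value = f'"{title_value}"'
--                 result.append(' ' * (section_indent + 2) + f"Title: {title_value}")
--         else:
--             result.append(line)
--             i += 1
--
--     return '\n'.join(result)
-- ===== SOURCE B (Python) =====
-- # Different algorithm: precompute each line's section boundary with a backward
-- # monotonic-stack pass (next following non-blank line with indent <= this
-- # line's indent), then render with index jumps over whole section bodies,
-- # rewriting body lines via a per-line map/drop and detecting missing fields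
-- # with `any` predicates instead of loop-carried flags.
--
-- def _quote_title(v):
--     if '"' not in v and "'" not in v:
--         return '"' + v + '"'
--     return v
--
--
-- def _render_line(l, pad, updates):
--     if l.strip() == '':
--         return [l]
--     if 'AppId:' in l:
--         return [pad + 'AppId: ' + str(updates['AppId'])] if 'AppId' in updates else []
--     if 'Title:' in l:
--         return [pad + 'Title: ' + _quote_title(str(updates['Title']))] if 'Title' in updates else []
--     return [l]
--
--
-- def _update_status_section(content: str, section_name: str, updates: dict) -> str:
--     lines = content.split('\n')
--     n = len(lines)
--     ind = [len(l) - len(l.lstrip()) for l in lines]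
--     blank = [l.strip() == '' for l in lines]
--     # nxt[i]: index of the first later non-blank line with indent <= ind[i]
--     # (or n), computed right-to-left with a monotonic stack over non-blank lines
--     nxt = [n] * n
--     stack = []  # (index, indent), indents non-decreasing from top to bottom
--     for i in range(n - 1, -1, -1):
--         if not blank[i]:
--             while stack and stack[-1][1] > ind[i]:
--                 stack.pop()
--             nxt[i] = stack[-1][0] if stack else n
--             stack.append((i, ind[i]))
--     head = section_name + ':'
--     res = []
--     i = 0
--     while i < n:
--         res.append(lines[i])
--         if lines[i].strip().startswith(head):
--             e = nxt[i]
--             pad = ' ' * (ind[i] + 2)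
--             body = lines[i + 1:e]
--             for l in body:
--                 res.extend(_render_line(l, pad, updates))
--             if 'AppId' in updates and not any(
--                     l.strip() != '' and 'AppId:' in l for l in body):
--                 res.append(pad + 'AppId: ' + str(updates['AppId']))
--             if 'Title' in updates and not any(
--                     l.strip() != '' and 'AppId:' not in l and 'Title:' in l for l in body):
--                 res.append(pad + 'Title: ' + _quote_title(str(updates['Title'])))
--             i = e
--         else:
--             i += 1
--     return '\n'.join(res)
-- ===== Notes on version B (the rewrite author's own statement) =====
-- stated objective: alternative
-- what changed: Replaced A's nested-while state machine by a two-phase algorithm: a backward monotonic-stack pass precomputes each line's section boundary (next non-blank line with indent <= its own), then a single rendering pass jumps over whole section bodies by index, rewrites body lines with a per-line map/drop helper and detects missing fields with any-predicates instead of loop-carried flags.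
import Mathlib
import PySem

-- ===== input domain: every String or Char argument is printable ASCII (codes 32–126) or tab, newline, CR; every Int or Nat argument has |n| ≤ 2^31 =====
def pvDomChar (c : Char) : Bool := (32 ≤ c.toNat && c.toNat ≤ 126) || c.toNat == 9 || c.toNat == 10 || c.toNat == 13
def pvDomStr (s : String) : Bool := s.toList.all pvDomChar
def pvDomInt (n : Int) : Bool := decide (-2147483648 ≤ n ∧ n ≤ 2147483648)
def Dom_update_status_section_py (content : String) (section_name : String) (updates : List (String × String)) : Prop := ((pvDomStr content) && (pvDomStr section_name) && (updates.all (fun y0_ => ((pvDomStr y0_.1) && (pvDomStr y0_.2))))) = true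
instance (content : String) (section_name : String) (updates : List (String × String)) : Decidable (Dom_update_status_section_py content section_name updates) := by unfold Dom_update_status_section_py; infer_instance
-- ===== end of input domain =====

-- B replaces A's nested-while state machine by a two-phase algorithm: a backward
-- monotonic-stack pass precomputes each line's section boundary, then one rendering
-- pass jumps over section bodies by index, rewriting lines via a per-line map/drop
-- helper and detecting missing fields with any-predicates; objective: alternative.


-- ===== PORT A =====
-- len(line) - len(line.lstrip())
def pvIndentA (line : String) : Nat := (PySem.Str.len line - PySem.Str.len (PySem.Str.lstrip line)).toNat

-- ' ' * (section_indent + 2) + f"AppId: {updates['AppId']}"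
def pvAppIdLineA (ind : Nat) (upd : PySem.Dict String String) : String :=
  String.ofList (List.replicate (ind + 2) ' ') ++ "AppId: " ++ upd.getD "AppId" ""

-- ' ' * (section_indent + 2) + f"Title: {title_value}" with the quoting rule
def pvTitleLineA (ind : Nat) (upd : PySem.Dict String String) : String :=
  let tv := upd.getD "Title" ""
  let tv := if PySem.Str.isIn "\"" tv = false ∧ PySem.Str.isIn "'" tv = false
            then "\"" ++ tv ++ "\"" else tv
  String.ofList (List.replicate (ind + 2) ' ') ++ "Title: " ++ tv

-- the inner `while i < len(lines)` loop: returns (remaining lines, result, found_appid, found_title)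
def pvInnerA (ind : Nat) (upd : PySem.Dict String String) :
    List String → List String → Bool → Bool → List String × List String × Bool × Bool
  | [], acc, fa, ft => ([], acc, fa, ft)
  | cur :: t, acc, fa, ft =>
    if PySem.Str.strip cur = "" then
      pvInnerA ind upd t (acc ++ [cur]) fa ft
    else if pvIndentA cur ≤ ind then
      (cur :: t, acc, fa, ft)
    else if PySem.Str.isIn "AppId:" cur then
      pvInnerA ind upd t (if upd.contains "AppId" then acc ++ [pvAppIdLineA ind upd] else acc) true ft
    else if PySem.Str.isIn "Title:" cur then
      pvInnerA ind upd t (if upd.contains "Title" then acc ++ [pvTitleLineA ind upd] else acc) fa true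
    else
      pvInnerA ind upd t (acc ++ [cur]) fa ft

theorem pvInnerA_rest_le (ind : Nat) (upd : PySem.Dict String String) :
    ∀ (rest acc : List String) (fa ft : Bool),
      (pvInnerA ind upd rest acc fa ft).1.length ≤ rest.length := by
  intro rest
  induction rest with
  | nil => intro acc fa ft; simp [pvInnerA]
  | cons cur t ih =>
    intro acc fa ft
    simp only [pvInnerA]
    split_ifs <;> simp <;> exact le_trans (ih _ _ _) (Nat.le_succ _)

-- the outer `while i < len(lines)` loop
def pvOuterA (name : String) (upd : PySem.Dict String String) :
    List String → List String → List String
  | [], acc => acc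
  | line :: t, acc =>
    if PySem.Str.startswith (PySem.Str.strip line) (name ++ ":") then
      let ind := pvIndentA line
      let r := pvInnerA ind upd t (acc ++ [line]) false false
      let acc1 := if r.2.2.1 = false ∧ upd.contains "AppId" then r.2.1 ++ [pvAppIdLineA ind upd] else r.2.1
      let acc2 := if r.2.2.2 = false ∧ upd.contains "Title" then acc1 ++ [pvTitleLineA ind upd] else acc1
      pvOuterA name upd r.1 acc2
    else
      pvOuterA name upd t (acc ++ [line])
termination_by lines _ => lines.length
decreasing_by
  · exact Nat.lt_succ_of_le (pvInnerA_rest_le _ _ _ _ _ _)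
  · simp

def update_status_section_py (content : String) (section_name : String) (updates : List (String × String)) : String :=
  PySem.Str.join "\n" (pvOuterA section_name (PySem.Dict.ofList updates) ((PySem.Str.split? content "\n").getD []) [])

-- ===== PORT B =====
def pvIndentB (line : String) : Nat := (PySem.Str.len line - PySem.Str.len (PySem.Str.lstrip line)).toNat
def pvBlankB (line : String) : Bool := PySem.Str.strip line == ""

-- _quote_title
def pvQuoteB (v : String) : String :=
  if PySem.Str.isIn "\"" v = false ∧ PySem.Str.isIn "'" v = false
  then "\"" ++ v ++ "\"" else v

-- _render_line
def pvRenderLineB (pad : String) (upd : PySem.Dict String String) (l : String) : List String :=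
  if pvBlankB l then [l]
  else if PySem.Str.isIn "AppId:" l then
    (if upd.contains "AppId" then [pad ++ "AppId: " ++ upd.getD "AppId" ""] else [])
  else if PySem.Str.isIn "Title:" l then
    (if upd.contains "Title" then [pad ++ "Title: " ++ pvQuoteB (upd.getD "Title" "")] else [])
  else [l]

-- the backward monotonic-stack pass `for i in range(n-1, -1, -1)`, as structural
-- recursion over the suffix of (indent, blank) pairs starting at index i;
-- returns (nxt values for indices i.., stack after processing them)
def pvBuildNxt (n : Nat) : Nat → List (Nat × Bool) → List Nat × List (Nat × Nat)
  | _, [] => ([], [])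
  | i, (d, b) :: t =>
    let r := pvBuildNxt n (i+1) t
    if b then (n :: r.1, r.2)
    else
      let st := r.2.dropWhile (fun p => decide (d < p.2))
      ((match st with | [] => n | p :: _ => p.1) :: r.1, (i, d) :: st)

-- the main `while i < n` rendering loop; fuel only makes the recursion structural
-- (i strictly increases each iteration), the computation is the Python's
def pvLoopB (n : Nat) (L : List String) (indL : List Nat) (nxtL : List Nat)
    (hd : String) (upd : PySem.Dict String String) : Nat → Nat → List String
  | 0, _ => []
  | fuel+1, i =>
    if i < n then
      let line := L.getD i ""
      if PySem.Str.startswith (PySem.Str.strip line) hd then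
        let e := nxtL.getD i n
        let pad := String.ofList (List.replicate (indL.getD i 0 + 2) ' ')
        let body := PySem.List.slice L (some ((i : Int) + 1)) (some (e : Int))
        line :: (body.flatMap (pvRenderLineB pad upd)
          ++ (if upd.contains "AppId" && !(body.any (fun l => !pvBlankB l && PySem.Str.isIn "AppId:" l))
              then [pad ++ "AppId: " ++ upd.getD "AppId" ""] else [])
          ++ (if upd.contains "Title" && !(body.any (fun l => !pvBlankB l && !PySem.Str.isIn "AppId:" l && PySem.Str.isIn "Title:" l))
              then [pad ++ "Title: " ++ pvQuoteB (upd.getD "Title" "")] else [])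
          ++ pvLoopB n L indL nxtL hd upd fuel e)
      else line :: pvLoopB n L indL nxtL hd upd fuel (i+1)
    else []

def update_status_section_py_alt (content : String) (section_name : String) (updates : List (String × String)) : String :=
  let L := (PySem.Str.split? content "\n").getD []
  let n := L.length
  let indL := L.map pvIndentB
  let nxtL := (pvBuildNxt n 0 (L.map (fun l => (pvIndentB l, pvBlankB l)))).1
  PySem.Str.join "\n" (pvLoopB n L indL nxtL (section_name ++ ":") (PySem.Dict.ofList updates) (n+1) 0)

-- ===== PRECONDITION & SPEC =====
def Spec_update_status_section_py (content : String) (section_name : String) (updates : List (String × String)) (out : String) : Prop := out = update_status_section_py_alt content section_name updates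
instance (content : String) (section_name : String) (updates : List (String × String)) (out : String) : Decidable (Spec_update_status_section_py content section_name updates out) := by unfold Spec_update_status_section_py; infer_instance

-- ===== CLAIM (what is proved, stated in full; the proofs are below) =====
def Claim_equal_update_status_section_py : Prop := ∀ (content : String) (section_name : String) (updates : List (String × String)), Dom_update_status_section_py content section_name updates → Spec_update_status_section_py content section_name updates (update_status_section_py content section_name updates)

-- ===== LEMMAS AND PROOFS =====

theorem pvIndentB_eq : pvIndentB = pvIndentA := rfl

-- body-membership condition of A's inner loop (blank or more indented)
def pvCondP (d : Nat) (l : String) : Bool := pvBlankB l || decide (d < pvIndentA l)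
def pvPad (ind : Nat) : String := String.ofList (List.replicate (ind + 2) ' ')

-- one step of A's inner loop on a body line, as a fold step
def pvRewStep (ind : Nat) (upd : PySem.Dict String String)
    (st : List String × Bool × Bool) (cur : String) : List String × Bool × Bool :=
  if PySem.Str.strip cur = "" then (st.1 ++ [cur], st.2.1, st.2.2)
  else if PySem.Str.isIn "AppId:" cur then
    ((if upd.contains "AppId" then st.1 ++ [pvAppIdLineA ind upd] else st.1), true, st.2.2)
  else if PySem.Str.isIn "Title:" cur then
    ((if upd.contains "Title" then st.1 ++ [pvTitleLineA ind upd] else st.1), st.2.1, true)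
  else (st.1 ++ [cur], st.2.1, st.2.2)

-- A's inner loop splits the body with takeWhile/dropWhile and folds over it
theorem pvInner_eq (ind : Nat) (upd : PySem.Dict String String) :
    ∀ (rest acc : List String) (fa ft : Bool),
      pvInnerA ind upd rest acc fa ft
        = (rest.dropWhile (pvCondP ind),
           ((rest.takeWhile (pvCondP ind)).foldl (pvRewStep ind upd) (acc, fa, ft)).1,
           ((rest.takeWhile (pvCondP ind)).foldl (pvRewStep ind upd) (acc, fa, ft)).2) := by
  intro rest
  induction rest with
  | nil => intro acc fa ft; simp [pvInnerA]
  | cons cur t ih =>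
    intro acc fa ft
    by_cases hb : PySem.Str.strip cur = ""
    · have hc : pvCondP ind cur = true := by simp [pvCondP, pvBlankB, hb]
      simp only [pvInnerA, if_pos hb, List.takeWhile_cons_of_pos hc,
        List.dropWhile_cons_of_pos hc, List.foldl_cons]
      rw [ih]
      simp [pvRewStep, hb]
    · by_cases hi : pvIndentA cur ≤ ind
      · have hc : pvCondP ind cur = false := by
          simp [pvCondP, pvBlankB, hb]
          omega
        have hc' : ¬ pvCondP ind cur = true := by simp [hc]
        simp only [pvInnerA, if_neg hb, if_pos hi]
        rw [List.takeWhile_cons_of_neg hc', List.dropWhile_cons_of_neg hc']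
        simp
      · have hc : pvCondP ind cur = true := by
          simp [pvCondP, pvBlankB, hb]
          omega
        by_cases ha : PySem.Str.isIn "AppId:" cur
        · simp only [pvInnerA, if_neg hb, if_neg hi, if_pos ha,
            List.takeWhile_cons_of_pos hc, List.dropWhile_cons_of_pos hc, List.foldl_cons]
          rw [ih]
          rw [show pvRewStep ind upd (acc, fa, ft) cur
              = ((if upd.contains "AppId" then acc ++ [pvAppIdLineA ind upd] else acc), true, ft) by
            unfold pvRewStep; rw [if_neg hb, if_pos ha]]
        · by_cases ht : PySem.Str.isIn "Title:" cur
          · simp only [pvInnerA, if_neg hb, if_neg hi, if_neg ha, if_pos ht,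
              List.takeWhile_cons_of_pos hc, List.dropWhile_cons_of_pos hc, List.foldl_cons]
            rw [ih]
            rw [show pvRewStep ind upd (acc, fa, ft) cur
                = ((if upd.contains "Title" then acc ++ [pvTitleLineA ind upd] else acc), fa, true) by
              unfold pvRewStep; rw [if_neg hb, if_neg ha, if_pos ht]]
          · simp only [pvInnerA, if_neg hb, if_neg hi, if_neg ha, if_neg ht,
              List.takeWhile_cons_of_pos hc, List.dropWhile_cons_of_pos hc, List.foldl_cons]
            rw [ih]
            rw [show pvRewStep ind upd (acc, fa, ft) cur = (acc ++ [cur], fa, ft) by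
              unfold pvRewStep; rw [if_neg hb, if_neg ha, if_neg ht]]

-- the fold over the body is a flatMap plus two `any` flags
theorem pvFold_flat (ind : Nat) (upd : PySem.Dict String String) :
    ∀ (body acc : List String) (fa ft : Bool),
      body.foldl (pvRewStep ind upd) (acc, fa, ft)
        = (acc ++ body.flatMap (pvRenderLineB (pvPad ind) upd),
           fa || body.any (fun l => !pvBlankB l && PySem.Str.isIn "AppId:" l),
           ft || body.any (fun l => !pvBlankB l && !PySem.Str.isIn "AppId:" l && PySem.Str.isIn "Title:" l)) := by
  intro body
  induction body with
  | nil => intro acc fa ft; simp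
  | cons cur t ih =>
    intro acc fa ft
    simp only [List.foldl_cons, List.flatMap_cons, List.any_cons]
    by_cases hb : PySem.Str.strip cur = ""
    · have hbl : pvBlankB cur = true := by simp [pvBlankB, hb]
      rw [show pvRewStep ind upd (acc, fa, ft) cur = (acc ++ [cur], fa, ft) by
        simp [pvRewStep, hb]]
      rw [ih]
      simp [pvRenderLineB, hbl]
    · have hbl : pvBlankB cur = false := by simp [pvBlankB, hb]
      by_cases ha : PySem.Str.isIn "AppId:" cur
      · rw [show pvRewStep ind upd (acc, fa, ft) cur
            = ((if upd.contains "AppId" then acc ++ [pvAppIdLineA ind upd] else acc), true, ft) by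
          unfold pvRewStep; rw [if_neg hb, if_pos ha]]
        rw [ih]
        simp only [pvRenderLineB, hbl, ha]
        split_ifs <;> simp_all [pvAppIdLineA, pvPad]
      · by_cases ht : PySem.Str.isIn "Title:" cur
        · rw [show pvRewStep ind upd (acc, fa, ft) cur
              = ((if upd.contains "Title" then acc ++ [pvTitleLineA ind upd] else acc), fa, true) by
            unfold pvRewStep; rw [if_neg hb, if_neg ha, if_pos ht]]
          rw [ih]
          simp only [pvRenderLineB, hbl, ha, ht]
          split_ifs <;> simp_all [pvTitleLineA, pvQuoteB, pvPad]
        · rw [show pvRewStep ind upd (acc, fa, ft) cur = (acc ++ [cur], fa, ft) by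
            unfold pvRewStep; rw [if_neg hb, if_neg ha, if_neg ht]]
          rw [ih]
          simp at ha ht
          simp [pvRenderLineB, hbl, ha, ht]

-- first body-boundary index in a (indent, blank) list, relative to its start
def pvFB (d : Nat) (xs : List (Nat × Bool)) : Nat :=
  xs.findIdx (fun p => !p.2 && decide (p.1 ≤ d))

def pvStackFind (n : Nat) (st : List (Nat × Nat)) (d : Nat) : Nat :=
  match st.dropWhile (fun p => decide (d < p.2)) with
  | [] => n
  | p :: _ => p.1

theorem pvDropWhile_dropWhile {α : Type} (p q : α → Bool)
    (h : ∀ x, q x = true → p x = true) (l : List α) :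
    (l.dropWhile q).dropWhile p = l.dropWhile p := by
  induction l with
  | nil => rfl
  | cons x t ih =>
    by_cases hq : q x = true
    · rw [List.dropWhile_cons_of_pos hq, ih, List.dropWhile_cons_of_pos (h x hq)]
    · rw [List.dropWhile_cons_of_neg hq]

-- stack invariant: searching the stack finds exactly the first boundary of the suffix
theorem pvStack_ok : ∀ (xs : List (Nat × Bool)) (i n : Nat), i + xs.length = n →
    ∀ d, pvStackFind n (pvBuildNxt n i xs).2 d = i + pvFB d xs := by
  intro xs
  induction xs with
  | nil =>
    intro i n h d
    simp only [List.length_nil, Nat.add_zero] at h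
    simp [pvBuildNxt, pvStackFind, pvFB, h]
  | cons p t ih =>
    intro i n h d
    obtain ⟨d0, b⟩ := p
    simp only [List.length_cons] at h
    cases b with
    | true =>
      have hred : (pvBuildNxt n i ((d0, true) :: t)).2 = (pvBuildNxt n (i+1) t).2 := by
        simp [pvBuildNxt]
      rw [hred, ih (i+1) n (by omega) d]
      have hfb : pvFB d ((d0, true) :: t) = pvFB d t + 1 := by
        simp [pvFB, List.findIdx_cons]
      rw [hfb]
      omega
    | false =>
      have hred : (pvBuildNxt n i ((d0, false) :: t)).2
          = (i, d0) :: (pvBuildNxt n (i+1) t).2.dropWhile (fun q => decide (d0 < q.2)) := by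
        simp [pvBuildNxt]
      rw [hred]
      by_cases hd : d < d0
      · have hstep : pvStackFind n
            ((i, d0) :: (pvBuildNxt n (i+1) t).2.dropWhile (fun q => decide (d0 < q.2))) d
            = pvStackFind n (pvBuildNxt n (i+1) t).2 d := by
          unfold pvStackFind
          rw [List.dropWhile_cons_of_pos (by simpa using hd)]
          rw [pvDropWhile_dropWhile (fun q => decide (d < q.2)) (fun q => decide (d0 < q.2))
            (fun x hx => by simp at hx ⊢; omega) (pvBuildNxt n (i+1) t).2]
        rw [hstep, ih (i+1) n (by omega) d]
        have hfb : pvFB d ((d0, false) :: t) = pvFB d t + 1 := by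
          simp [pvFB, List.findIdx_cons, show ¬ d0 ≤ d by omega]
        rw [hfb]
        omega
      · have hfind : pvStackFind n
            ((i, d0) :: (pvBuildNxt n (i+1) t).2.dropWhile (fun q => decide (d0 < q.2))) d = i := by
          unfold pvStackFind
          rw [List.dropWhile_cons_of_neg (by simpa using hd)]
        rw [hfind]
        have hfb : pvFB d ((d0, false) :: t) = 0 := by
          simp [pvFB, List.findIdx_cons, show d0 ≤ d by omega]
        rw [hfb]
        omega

-- the recorded nxt value of a non-blank entry
theorem pvNxt_ok : ∀ (xs : List (Nat × Bool)) (i n k : Nat), i + xs.length = n →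
    k < xs.length → (xs.getD k (0, true)).2 = false →
    (pvBuildNxt n i xs).1.getD k n
      = (i + k + 1) + pvFB (xs.getD k (0, true)).1 (xs.drop (k+1)) := by
  intro xs
  induction xs with
  | nil => intro i n k _ hk; simp at hk
  | cons p t ih =>
    intro i n k h hk hb
    obtain ⟨d0, b⟩ := p
    cases k with
    | zero =>
      simp only [List.getD_cons_zero] at hb ⊢
      subst hb
      simp only [List.length_cons] at h
      rw [show (pvBuildNxt n i ((d0, false) :: t)).1.getD 0 n
          = pvStackFind n (pvBuildNxt n (i+1) t).2 d0 from rfl]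
      rw [pvStack_ok t (i+1) n (by omega) d0]
      simp only [List.drop_succ_cons, List.drop_zero]
    | succ k =>
      simp only [List.getD_cons_succ] at hb ⊢
      simp only [List.length_cons] at h hk
      have h1 : (pvBuildNxt n i ((d0, b) :: t)).1 = (pvBuildNxt n i ((d0, b) :: t)).1.headD n :: (pvBuildNxt n (i+1) t).1 := by
        cases b <;> simp [pvBuildNxt]
      rw [h1]
      simp only [List.getD_cons_succ, List.drop_succ_cons]
      rw [ih (i+1) n k (by omega) (by omega) hb]
      omega

theorem pvFB_map (d : Nat) (l : List String) :
    pvFB d (l.map (fun x => (pvIndentA x, pvBlankB x))) = (l.takeWhile (pvCondP d)).length := by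
  induction l with
  | nil => simp [pvFB]
  | cons x t ih =>
    by_cases hc : pvCondP d x = true
    · have hp : (!pvBlankB x && decide (pvIndentA x ≤ d)) = false := by
        simp [pvCondP] at hc
        rcases hc with hc | hc <;> simp [hc]
      simp only [List.map_cons, pvFB, List.findIdx_cons, hp, cond_false,
        List.takeWhile_cons_of_pos hc, List.length_cons]
      rw [← pvFB]
      omega
    · have hp : (!pvBlankB x && decide (pvIndentA x ≤ d)) = true := by
        simp [pvCondP] at hc
        simp [hc.1]
        omega
      have hc' : ¬ pvCondP d x = true := hc
      simp only [List.map_cons, pvFB, List.findIdx_cons, hp, cond_true]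
      rw [List.takeWhile_cons_of_neg hc']
      simp

-- A's Prop-guarded append equals B's Bool-guarded tail list
theorem pvCondSplit (f b : Bool) (x : String) (acc : List String) :
    (if f = false ∧ b = true then acc ++ [x] else acc)
      = acc ++ (if b && !f then [x] else []) := by
  cases b <;> cases f <;> simp

-- a section-header line is never blank (the header pattern is non-empty)
theorem pvHeader_nonblank (line name : String)
    (hh : PySem.Str.startswith (PySem.Str.strip line) (name ++ ":") = true) :
    pvBlankB line = false := by
  cases hbb : pvBlankB line with
  | false => rfl
  | true =>
    exfalso
    have hs : PySem.Str.strip line = "" := by simpa [pvBlankB] using hbb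
    rw [hs] at hh
    have hpre := (PySem.Chars.startswith_iff _ _).mp (by simpa using hh)
    simp at hpre

-- the main loop of B renders exactly what A's outer loop appends
theorem pvLoop_eq (name : String) (upd : PySem.Dict String String) (L : List String) :
    ∀ (fuel i : Nat) (acc : List String), L.length ≤ i + fuel →
      pvOuterA name upd (L.drop i) acc
        = acc ++ pvLoopB L.length L (L.map pvIndentB)
            ((pvBuildNxt L.length 0 (L.map (fun l => (pvIndentB l, pvBlankB l)))).1)
            (name ++ ":") upd fuel i := by
  simp only [pvIndentB_eq]
  intro fuel
  induction fuel with
  | zero =>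
    intro i acc h
    have hnil : L.drop i = [] := by rw [List.drop_eq_nil_iff]; omega
    rw [hnil]
    simp [pvOuterA, pvLoopB]
  | succ fuel ih =>
    intro i acc h
    by_cases hi : i < L.length
    · have hdrop : L.drop i = L[i] :: L.drop (i+1) := List.drop_eq_getElem_cons hi
      have hgetD : L.getD i "" = L[i] := List.getD_eq_getElem L "" hi
      rw [hdrop]
      by_cases hh : PySem.Str.startswith (PySem.Str.strip (L[i])) (name ++ ":") = true
      · -- header line
        have hnb : pvBlankB (L[i]) = false := pvHeader_nonblank _ _ hh
        set d := pvIndentA (L[i]) with hd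
        set k := ((L.drop (i+1)).takeWhile (pvCondP d)).length with hk
        -- the stack-computed boundary is i+1+k
        have hTi : (L.map (fun l => (pvIndentA l, pvBlankB l))).getD i (0, true)
            = (pvIndentA (L[i]), pvBlankB (L[i])) := by
          simp [List.getD_eq_getElem?_getD, List.getElem?_map, List.getElem?_eq_getElem hi]
        have hIi : (L.map pvIndentA).getD i 0 = d := by
          simp [List.getD_eq_getElem?_getD, List.getElem?_map, List.getElem?_eq_getElem hi, hd]
        have he : ((pvBuildNxt L.length 0 (L.map (fun l => (pvIndentA l, pvBlankB l)))).1).getD i L.length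
            = i + 1 + k := by
          rw [pvNxt_ok (L.map (fun l => (pvIndentA l, pvBlankB l))) 0 L.length i
            (by simp) (by simpa using hi) (by rw [hTi]; exact hnb)]
          rw [hTi]
          dsimp only
          rw [← List.map_drop, pvFB_map, ← hd, ← hk]
          omega
        -- the body slice is takeWhile
        have hsl : PySem.List.slice L (some ((i : Int) + 1)) (some ((i+1+k : Nat) : Int))
            = (L.drop (i+1)).takeWhile (pvCondP d) := by
          rw [show ((i : Int) + 1) = ((i+1 : Nat) : Int) by push_cast; ring]
          rw [PySem.List.slice_natCast]
          rw [show i+1+k - (i+1) = k by omega]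
          rw [hk]
          exact (List.prefix_iff_eq_take.mp (List.takeWhile_prefix _)).symm
        -- the rest after the body
        have hrest : (L.drop (i+1)).dropWhile (pvCondP d) = L.drop (i+1+k) := by
          have h2 : L.drop (i+1+k)
              = ((L.drop (i+1)).takeWhile (pvCondP d) ++ (L.drop (i+1)).dropWhile (pvCondP d)).drop k := by
            rw [List.takeWhile_append_dropWhile, List.drop_drop]
          rw [h2, List.drop_left' hk.symm]
        -- unfold one step of A
        rw [pvOuterA]
        simp only [if_pos hh]
        rw [pvInner_eq, pvFold_flat]
        -- unfold one step of B
        rw [pvLoopB]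
        simp only [if_pos hi, hgetD, if_pos hh, hIi, he, hsl, ← hd]
        rw [hrest]
        rw [ih (i+1+k) _ (by omega)]
        rw [show String.ofList (List.replicate (d + 2) ' ') = pvPad d from rfl]
        rw [show pvAppIdLineA d upd = pvPad d ++ "AppId: " ++ upd.getD "AppId" "" from rfl,
            show pvTitleLineA d upd = pvPad d ++ "Title: " ++ pvQuoteB (upd.getD "Title" "") from rfl]
        rw [pvCondSplit, pvCondSplit]
        simp [List.append_assoc, Bool.false_or]
      · -- ordinary line
        rw [pvOuterA]
        simp only [if_neg hh]
        rw [pvLoopB]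
        simp only [if_pos hi, hgetD, if_neg hh]
        rw [ih (i+1) (acc ++ [L[i]]) (by omega)]
        simp
    · have hnil : L.drop i = [] := by rw [List.drop_eq_nil_iff]; omega
      rw [hnil, pvLoopB]
      simp [pvOuterA, hi]


-- ===== VERDICT (by name: the statement is the Claim_ definition above) =====
theorem update_status_section_py_spec : Claim_equal_update_status_section_py := by
  intro content section_name updates _
  unfold Spec_update_status_section_py update_status_section_py update_status_section_py_alt
  have h := pvLoop_eq section_name (PySem.Dict.ofList updates)
    ((PySem.Str.split? content "\n").getD [])
    (((PySem.Str.split? content "\n").getD []).length + 1) 0 [] (by omega)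
  simp only [List.drop_zero, List.nil_append] at h
  exact congrArg (PySem.Str.join "\n") h
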